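-- pv_equiv track=rewrite | github.com/tadahayamiz/faersutil | faersutil/calculator2.py | return_boundary
-- ===== SOURCE A (Python) =====
-- def return_boundary(unique_date:list,first:str):
--     """
--     unique_date : ['20211017','20170625','20001225','19980625','19450901']
--     first : '20150304'
--     return 20001225
--     """
--     sorted_date = sorted(unique_date,reverse=True)
--     if first <= sorted_date[-1]:
--         return sorted_date[-1]
--     else:
--         for t in  sorted_date:
--             if first <= t:
--                 pass
--             else:
--                 return t
--                 break
-- ===== SOURCE B (Python) =====
-- def return_boundary(unique_date: list, first: str):
--     # One linear pass instead of sorting: the answer is the largest date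
--     # strictly below `first`, or the overall minimum if no date is below it.
--     candidates = [d for d in unique_date if d < first]
--     if candidates:
--         return max(candidates)
--     return min(unique_date)
-- ===== Notes on version B (the rewrite author's own statement) =====
-- stated objective: faster
-- what changed: Replaced the descending sort plus linear scan with a single filter pass: return max of the dates strictly below first, or min of the list when none is below.
import Mathlib
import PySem

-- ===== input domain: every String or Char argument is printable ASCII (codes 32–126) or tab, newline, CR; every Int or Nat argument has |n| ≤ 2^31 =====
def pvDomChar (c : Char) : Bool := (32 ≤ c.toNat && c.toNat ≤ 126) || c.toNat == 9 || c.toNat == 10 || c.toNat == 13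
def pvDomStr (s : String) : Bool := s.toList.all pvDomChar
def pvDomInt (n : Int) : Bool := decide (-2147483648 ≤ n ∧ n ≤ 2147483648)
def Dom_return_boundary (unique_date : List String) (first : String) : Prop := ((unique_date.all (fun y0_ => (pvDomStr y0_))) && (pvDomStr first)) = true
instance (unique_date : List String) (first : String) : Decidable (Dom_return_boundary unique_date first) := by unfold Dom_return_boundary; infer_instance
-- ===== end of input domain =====

-- B replaces A's descending sort + scan with one linear filter pass (max of dates
-- strictly below `first`, else the minimum of the list).

-- ===== PORT A =====
-- the 'for t in sorted_date: if first <= t: pass else: return t' loop of A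
def pvLoopA (first : String) : List String → Option String
  | [] => none
  | t :: ts => if first ≤ t then pvLoopA first ts else some t

def return_boundary (unique_date : List String) (first : String) : Option String :=
  let sorted_date := PySem.List.sorted unique_date (fun x => x) true
  match PySem.List.pyGet? sorted_date (-1) with
  | none => none   -- IndexError on the empty list
  | some last => if first ≤ last then some last else pvLoopA first sorted_date

-- ===== PORT B =====
def return_boundary_alt (unique_date : List String) (first : String) : Option String :=
  let candidates := unique_date.filter (fun d => decide (d < first))
  if candidates.isEmpty then PySem.List.min? unique_date (fun x => x)
  else PySem.List.max? candidates (fun x => x)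

-- ===== PRECONDITION & SPEC =====
-- Pre_ excludes only the empty list, on which A raises IndexError (and B ValueError).
def Pre_return_boundary (unique_date : List String) (first : String) : Prop :=
  unique_date ≠ []
instance (unique_date : List String) (first : String) : Decidable (Pre_return_boundary unique_date first) := by unfold Pre_return_boundary; infer_instance

def pvWitness_return_boundary : List String × String :=
  (["20211017", "20170625", "20001225", "19980625", "19450901"], "20150304")

def Spec_return_boundary (unique_date : List String) (first : String) (out : Option String) : Prop := out = return_boundary_alt unique_date first
instance (unique_date : List String) (first : String) (out : Option String) : Decidable (Spec_return_boundary unique_date first out) := by unfold Spec_return_boundary; infer_instance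

-- ===== CLAIM (what is proved, stated in full; the proofs are below) =====
def Claim_equal_return_boundary : Prop := ∀ (unique_date : List String) (first : String), Dom_return_boundary unique_date first → Pre_return_boundary unique_date first → Spec_return_boundary unique_date first (return_boundary unique_date first)

-- ===== LEMMAS AND PROOFS =====

-- in a weakly-descending list the last element is a lower bound
theorem pv_getLast_min (l : List String) (h : l ≠ [])
    (hp : l.Pairwise (fun a b => b ≤ a)) : ∀ y ∈ l, l.getLast h ≤ y := by
  induction l with
  | nil => exact absurd rfl h
  | cons x xs ih =>
    rcases List.pairwise_cons.mp hp with ⟨hx, hxs⟩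
    intro y hy
    cases xs with
    | nil =>
      rcases List.mem_cons.mp hy with rfl | hy'
      · simp
      · exact absurd hy' (List.not_mem_nil)
    | cons z zs =>
      have hne : (z :: zs) ≠ [] := by simp
      rw [List.getLast_cons hne]
      rcases List.mem_cons.mp hy with rfl | hy'
      · exact hx _ (List.getLast_mem hne)
      · exact ih hne hxs y hy'

-- A's scan over a weakly-descending list returns the maximum element below `first`
theorem pv_loopA_spec (first : String) :
    ∀ (l : List String), l.Pairwise (fun a b => b ≤ a) →
      ∀ t ∈ l, t < first →
        ∃ r, pvLoopA first l = some r ∧ r ∈ l ∧ r < first ∧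
          ∀ y ∈ l, y < first → y ≤ r := by
  intro l
  induction l with
  | nil => intro _ t ht; exact absurd ht (List.not_mem_nil)
  | cons x xs ih =>
    intro hp t ht htf
    rcases List.pairwise_cons.mp hp with ⟨hx, hxs⟩
    by_cases hfx : first ≤ x
    · have htxs : t ∈ xs := by
        rcases List.mem_cons.mp ht with rfl | h
        · exact absurd hfx (not_le.mpr htf)
        · exact h
      rcases ih hxs t htxs htf with ⟨r, hr, hrm, hrf, hmax⟩
      refine ⟨r, ?_, List.mem_cons_of_mem _ hrm, hrf, ?_⟩
      · simpa [pvLoopA, hfx] using hr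
      · intro y hy hyf
        rcases List.mem_cons.mp hy with rfl | h
        · exact absurd hfx (not_le.mpr hyf)
        · exact hmax y h hyf
    · refine ⟨x, ?_, List.mem_cons_self, not_le.mp hfx, ?_⟩
      · simp [pvLoopA, hfx]
      · intro y hy _
        rcases List.mem_cons.mp hy with rfl | h
        · exact le_refl y
        · exact hx y h

-- zeta-reduced unfoldings of the two ports (definitional)
theorem pv_A_eq (ud : List String) (first : String) :
    return_boundary ud first =
      (match PySem.List.pyGet? (PySem.List.sorted ud (fun x => x) true) (-1) with
       | none => none
       | some last => if first ≤ last then some last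
                      else pvLoopA first (PySem.List.sorted ud (fun x => x) true)) := rfl

theorem pv_B_eq (ud : List String) (first : String) :
    return_boundary_alt ud first =
      (if (ud.filter (fun d => decide (d < first))).isEmpty
       then PySem.List.min? ud (fun x => x)
       else PySem.List.max? (ud.filter (fun d => decide (d < first))) (fun x => x)) := rfl

-- ===== VERDICT (by name: the statement is the Claim_ definition above) =====
theorem return_boundary_spec : Claim_equal_return_boundary := by
  intro ud first _ hpre
  unfold Spec_return_boundary
  rw [pv_A_eq, pv_B_eq]
  set s := PySem.List.sorted ud (fun x => x) true with hs
  have hsne : s ≠ [] := by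
    rw [hs, Ne, PySem.List.sorted_eq_nil_iff]; exact hpre
  have hperm : s.Perm ud := PySem.List.sorted_perm ud (fun x => x) true
  have hpair : s.Pairwise (fun a b => b ≤ a) := PySem.List.sorted_pairwise_rev ud (fun x => x)
  have hlast : PySem.List.pyGet? s (-1) = some (s.getLast hsne) := by
    rw [PySem.List.pyGet?_neg_one, List.getLast?_eq_getLast_of_ne_nil hsne]
  set m := s.getLast hsne with hm
  have hmmem : m ∈ ud := hperm.mem_iff.mp (List.getLast_mem hsne)
  have hmmin : ∀ y ∈ ud, m ≤ y := fun y hy =>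
    pv_getLast_min s hsne hpair y (hperm.mem_iff.mpr hy)
  rw [hlast]
  show (if first ≤ m then some m else pvLoopA first s) = _
  by_cases hfm : first ≤ m
  · -- no date below first: both sides return the minimum
    have hfilt : ud.filter (fun d => decide (d < first)) = [] := by
      rw [List.filter_eq_nil_iff]
      intro y hy
      simp only [decide_eq_true_eq, not_lt]
      exact le_trans hfm (hmmin y hy)
    rw [if_pos hfm]
    simp only [hfilt, List.isEmpty_nil, if_pos]
    rcases hmn : PySem.List.min? ud (fun x => x) with _ | m'
    · exact absurd ((PySem.List.min?_eq_none_iff ud _).mp hmn) hpre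
    · have h1 : m ≤ m' := hmmin m' (PySem.List.min?_mem hmn)
      have h2 : m' ≤ m := PySem.List.min?_isMin hmn m hmmem
      rw [le_antisymm h1 h2]
  · -- some date below first: both sides return the maximum date below first
    have hmf : m < first := not_le.mp hfm
    rw [if_neg hfm]
    rcases pv_loopA_spec first s hpair m (List.getLast_mem hsne) hmf with
      ⟨r, hr, hrmem, hrf, hrmax⟩
    have hfilt : ud.filter (fun d => decide (d < first)) ≠ [] := by
      intro hnil
      have := List.filter_eq_nil_iff.mp hnil m hmmem
      simp [hmf] at this
    rw [hr]
    simp only [List.isEmpty_eq_false_iff.mpr hfilt, if_neg, Bool.false_eq_true,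
      not_false_eq_true]
    rcases hmx : PySem.List.max? (ud.filter (fun d => decide (d < first))) (fun x => x)
      with _ | r'
    · exact absurd ((PySem.List.max?_eq_none_iff _ _).mp hmx) hfilt
    · have hr'mem := PySem.List.max?_mem hmx
      have hr'f : r' < first := by
        have := List.mem_filter.mp hr'mem
        simpa using this.2
      have h1 : r' ≤ r := hrmax r' (hperm.mem_iff.mpr (List.mem_of_mem_filter hr'mem)) hr'f
      have h2 : r ≤ r' := PySem.List.max?_isMax hmx r
        (List.mem_filter.mpr ⟨hperm.mem_iff.mp hrmem, by simpa using hrf⟩)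
      rw [le_antisymm h2 h1]
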